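-- pv_equiv track=rewrite | github.com/1zbbxzak1/python-basics-course | part 2/module 6/task_4.py | invert_frequency_dict
-- ===== SOURCE A (Python) =====
-- def invert_frequency_dict(text):
--     char_count = {}
--
--     for char in text:
--         char_count[char] = char_count.get(char, 0) + 1
--
--     inverted_dict = {}
--     for char, count in char_count.items():
--         inverted_dict.setdefault(count, []).append(char)
--
--     return inverted_dict
-- ===== SOURCE B (Python) =====
-- def invert_frequency_dict(text):
--     # Gather-style: dedup chars first, count each, then group chars per distinct count.
--     chars = list(dict.fromkeys(text))
--     counts = {c: sum(1 for ch in text if ch == c) for c in chars}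
--     return {v: [c for c in chars if counts[c] == v]
--             for v in dict.fromkeys(counts.values())}
-- ===== Notes on version B (the rewrite author's own statement) =====
-- stated objective: alternative
-- what changed: A builds the count dict in one scatter pass and inverts it with setdefault/append; B instead dedups the characters, counts each one directly from the text, and builds each distinct count's character list by filtering (gather instead of scatter).
import Mathlib
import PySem

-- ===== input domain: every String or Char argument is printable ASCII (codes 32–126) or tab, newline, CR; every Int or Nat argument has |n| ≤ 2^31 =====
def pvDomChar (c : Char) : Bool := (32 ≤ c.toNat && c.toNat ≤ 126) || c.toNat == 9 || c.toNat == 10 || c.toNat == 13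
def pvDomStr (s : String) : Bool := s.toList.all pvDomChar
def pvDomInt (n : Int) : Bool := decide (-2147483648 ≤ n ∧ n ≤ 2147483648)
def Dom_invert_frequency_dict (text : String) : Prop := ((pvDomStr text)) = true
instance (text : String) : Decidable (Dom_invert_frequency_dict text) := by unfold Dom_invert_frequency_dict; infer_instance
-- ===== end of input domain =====

-- B replaces A's two scatter passes (single-pass dict counting, then setdefault/append inversion)
-- by a gather decomposition: dedup the chars, count each one, then build each count's char list by
-- filtering; objective: alternative (same observable result, no speed claim).


-- ===== PORT A =====
def invert_frequency_dict (text : String) : List (Int × List String) :=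
  -- char_count[char] = char_count.get(char, 0) + 1
  let char_count : PySem.Dict Char Int :=
    text.toList.foldl (fun d c => d.insert c (d.getD c 0 + 1)) PySem.Dict.empty
  -- inverted_dict.setdefault(count, []).append(char)
  let inverted_dict : PySem.Dict Int (List String) :=
    char_count.items.foldl (fun d p => d.modify p.2 [] (· ++ [String.ofList [p.1]])) PySem.Dict.empty
  inverted_dict.items

-- ===== PORT B =====
def invert_frequency_dict_alt (text : String) : List (Int × List String) :=
  -- chars = list(dict.fromkeys(text))
  let chars : List Char := PySem.List.dedup text.toList
  -- counts = {c: sum(1 for ch in text if ch == c) for c in chars}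
  let counts : PySem.Dict Char Int :=
    PySem.Dict.ofList (chars.map (fun c =>
      (c, text.toList.foldl (fun acc ch => if ch == c then acc + 1 else acc) 0)))
  -- {v: [c for c in chars if counts[c] == v] for v in dict.fromkeys(counts.values())}
  (PySem.Dict.ofList ((PySem.List.dedup counts.values).map (fun v =>
    (v, (chars.filter (fun c => counts.getD c 0 == v)).map (fun c => String.ofList [c]))))).items

-- ===== PRECONDITION & SPEC =====
def Spec_invert_frequency_dict (text : String) (out : List (Int × List String)) : Prop := out = invert_frequency_dict_alt text
instance (text : String) (out : List (Int × List String)) : Decidable (Spec_invert_frequency_dict text out) := by unfold Spec_invert_frequency_dict; infer_instance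

-- ===== CLAIM (what is proved, stated in full; the proofs are below) =====
def Claim_equal_invert_frequency_dict : Prop := ∀ (text : String), Dom_invert_frequency_dict text → Spec_invert_frequency_dict text (invert_frequency_dict text)

-- ===== LEMMAS AND PROOFS =====

def pvStep (d : PySem.Dict Int (List String)) (p : Char × Int) : PySem.Dict Int (List String) :=
  d.modify p.2 [] (· ++ [String.ofList [p.1]])

theorem pv_getD_scatter (l : List (Char × Int)) (d : PySem.Dict Int (List String)) (v : Int) :
    (l.foldl pvStep d).getD v []
      = d.getD v [] ++ (l.filter (fun p => p.2 == v)).map (fun p => String.ofList [p.1]) := by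
  induction l generalizing d with
  | nil => simp
  | cons p l ih =>
    simp only [List.foldl_cons, ih, List.filter_cons]
    by_cases hv : p.2 = v
    · subst hv
      simp [pvStep]
    · simp [pvStep, PySem.Dict.getD_modify, hv, Ne.symm hv]

theorem pv_keys_scatter (l : List (Char × Int)) :
    (l.foldl pvStep PySem.Dict.empty).keys = PySem.Set.ofList (l.map (·.2)) := by
  have h := PySem.Dict.keys_foldl_modify_key l (fun p : Char × Int => p.2) ([] : List String)
      (fun _ p xs => xs ++ [String.ofList [p.1]]) PySem.Dict.empty
  have he : (fun (d : PySem.Dict Int (List String)) (p : Char × Int) =>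
      d.modify p.2 [] fun xs => xs ++ [String.ofList [p.1]]) = pvStep := rfl
  rw [he] at h
  rw [h, PySem.Set.ofList_eq_foldl]
  rfl

theorem pv_items_scatter (l : List (Char × Int)) :
    (l.foldl pvStep PySem.Dict.empty).items
      = (PySem.List.dedup (l.map (·.2))).map (fun v =>
          (v, (l.filter (fun p => p.2 == v)).map (fun p => String.ofList [p.1]))) := by
  induction l using List.reverseRecOn with
  | nil => rfl
  | append_singleton l p ih =>
    rw [List.foldl_append, List.foldl_cons, List.foldl_nil]
    have hded : PySem.List.dedup ((l ++ [p]).map (·.2))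
        = PySem.Set.add (PySem.List.dedup (l.map (·.2))) p.2 := by
      simp only [List.map_append, List.map_cons, List.map_nil, PySem.List.dedup,
        PySem.Set.ofList_eq_foldl, List.foldl_append, List.foldl_cons, List.foldl_nil]
    by_cases hc : (l.foldl pvStep PySem.Dict.empty).contains p.2 = true
    · -- existing count key: in-place update
      have hmem : p.2 ∈ PySem.List.dedup (l.map (·.2)) := by
        have := (PySem.Dict.contains_iff_mem_keys _ _).mp hc
        rwa [pv_keys_scatter] at this
      have hmem' : ∃ a, (a, p.2) ∈ l := by
        rw [PySem.List.dedup, PySem.Set.mem_ofList, List.mem_map] at hmem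
        obtain ⟨q, hq, he⟩ := hmem
        exact ⟨q.1, by rw [show (q.1, p.2) = q from by rw [← he]]; exact hq⟩
      have hadd : PySem.Set.add (PySem.List.dedup (l.map (·.2))) p.2
          = PySem.List.dedup (l.map (·.2)) := by
        simp only [PySem.Set.add, PySem.Set.contains]
        rw [if_pos (by simp; exact hmem')]
      rw [hded, hadd]
      show ((l.foldl pvStep PySem.Dict.empty).insert p.2 _).items = _
      rw [PySem.Dict.items_insert_of_contains _ _ hc, ih, List.map_map]
      refine List.map_congr_left (fun v hv => ?_)
      by_cases hveq : v = p.2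
      · subst hveq
        simp only [Function.comp_apply, beq_self_eq_true, if_pos]
        rw [pv_getD_scatter, List.filter_append, List.map_append]
        simp [PySem.Dict.getD_empty]
      · simp only [Function.comp_apply]
        rw [if_neg (by simp [hveq])]
        simp [List.filter_append, Ne.symm hveq]
    · -- fresh count key: appended
      have hnmem : p.2 ∉ PySem.List.dedup (l.map (·.2)) := by
        intro hmem
        exact absurd ((PySem.Dict.contains_iff_mem_keys _ _).mpr (by rwa [pv_keys_scatter])) hc
      have hnmem' : ∀ x : Char, (x, p.2) ∉ l := by
        intro x hx
        exact hnmem (by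
          rw [PySem.List.dedup, PySem.Set.mem_ofList]
          exact List.mem_map.mpr ⟨(x, p.2), hx, rfl⟩)
      have hadd : PySem.Set.add (PySem.List.dedup (l.map (·.2))) p.2
          = PySem.List.dedup (l.map (·.2)) ++ [p.2] := by
        simp only [PySem.Set.add, PySem.Set.contains]
        rw [if_neg (by simp; exact hnmem')]
      rw [hded, hadd]
      show ((l.foldl pvStep PySem.Dict.empty).insert p.2 _).items = _
      rw [PySem.Dict.items_insert_of_not_contains _ _ (by simpa using hc), ih, List.map_append]
      congr 1
      · refine List.map_congr_left (fun v hv => ?_)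
        have hveq : v ≠ p.2 := fun h => hnmem (h ▸ hv)
        simp [List.filter_append, Ne.symm hveq]
      · have hfl : l.filter (fun q => q.2 == p.2) = [] := by
          rw [List.filter_eq_nil_iff]
          intro q hq hbe
          exact hnmem (by
            rw [PySem.List.dedup, PySem.Set.mem_ofList]
            exact (eq_of_beq hbe) ▸ List.mem_map_of_mem hq)
        rw [pv_getD_scatter]
        simp only [List.filter_append, hfl, List.map_nil, List.nil_append,
          PySem.Dict.getD_empty, List.filter_cons, List.filter_nil, beq_self_eq_true,
          if_pos, List.map_cons]

theorem pv_items_ofList {κ ν : Type} [BEq κ] [LawfulBEq κ] (l : List (κ × ν))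
    (h : (l.map (·.1)).Nodup) : (PySem.Dict.ofList l).items = l := by
  have := PySem.Dict.items_foldl_insert_fresh l (fun p => p.1) (fun p => p.2)
    PySem.Dict.empty (fun a _ => by simp [PySem.Dict.contains_empty]) h
  simpa [PySem.Dict.ofList, PySem.Dict.update] using this

theorem pv_main (text : String) : invert_frequency_dict text = invert_frequency_dict_alt text := by
  unfold invert_frequency_dict invert_frequency_dict_alt
  dsimp only
  set chars := PySem.List.dedup text.toList with hchars
  set cnt : Char → Int := fun c => (text.toList.count c : Int) with hcnt
  -- B's per-char sum is the count
  have hsum : ∀ c : Char,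
      text.toList.foldl (fun acc ch => if ch == c then acc + 1 else acc) 0 = cnt c := by
    intro c; rw [PySem.List.foldl_beq_add_one]; simp [hcnt]
  -- B's counts dict literally lists (c, cnt c) for c ∈ chars
  have hpairs : (chars.map (fun c =>
      (c, text.toList.foldl (fun acc ch => if ch == c then acc + 1 else acc) 0)))
      = chars.map (fun c => (c, cnt c)) := by
    exact List.map_congr_left (fun c _ => by rw [hsum])
  have hnodupchars : chars.Nodup := by rw [hchars, PySem.List.dedup]; exact PySem.Set.nodup_ofList _
  have hitems : (PySem.Dict.ofList (chars.map (fun c =>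
      (c, text.toList.foldl (fun acc ch => if ch == c then acc + 1 else acc) (0 : Int))))).items
      = chars.map (fun c => (c, cnt c)) := by
    rw [hpairs]
    refine pv_items_ofList _ ?_
    have : (chars.map (fun c => (c, cnt c))).map (·.1) = chars := by
      rw [List.map_map]
      exact (List.map_congr_left (fun c _ => rfl)).trans (List.map_id _)
    rw [this]; exact hnodupchars
  -- A's char_count items
  have hA : (text.toList.foldl (fun d c => d.insert c (d.getD c 0 + 1)) PySem.Dict.empty).items
      = chars.map (fun c => (c, cnt c)) := by
    rw [PySem.Dict.foldl_insert_getD_add_one_eq_counter, PySem.Dict.items_counter]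
    rfl
  rw [hA]
  -- A side: scatter fold over the counter items
  have hstep : (fun (d : PySem.Dict Int (List String)) (p : Char × Int) =>
      d.modify p.2 [] (· ++ [String.ofList [p.1]])) = pvStep := rfl
  rw [hstep, pv_items_scatter]
  -- B side
  have hgetD : ∀ c ∈ chars,
      (PySem.Dict.ofList (chars.map (fun c =>
        (c, text.toList.foldl (fun acc ch => if ch == c then acc + 1 else acc) (0 : Int))))).getD c 0
      = cnt c := by
    intro c hc
    have h1 : (c, cnt c) ∈ (PySem.Dict.ofList (chars.map (fun c =>
        (c, text.toList.foldl (fun acc ch => if ch == c then acc + 1 else acc) (0 : Int))))).items := by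
      rw [hitems]; exact List.mem_map.mpr ⟨c, hc, rfl⟩
    have h2 : ((PySem.Dict.ofList (chars.map (fun c =>
        (c, text.toList.foldl (fun acc ch => if ch == c then acc + 1 else acc) (0 : Int))))).items.map
        (·.1)).Nodup := by
      rw [hitems, List.map_map]
      exact ((List.map_congr_left (fun c _ => rfl)).trans (List.map_id _)).symm ▸ hnodupchars
    exact PySem.Dict.getD_of_mem_items _ h1 h2 0
  set cd : PySem.Dict Char Int := PySem.Dict.ofList (chars.map (fun c =>
      (c, text.toList.foldl (fun acc ch => if ch == c then acc + 1 else acc) (0 : Int)))) with hcd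
  have hvalues : cd.values = (chars.map (fun c => (c, cnt c))).map (·.2) := by
    show cd.items.map (·.2) = _
    rw [hitems]
  rw [hvalues]
  set vals := PySem.List.dedup ((chars.map (fun c => (c, cnt c))).map (·.2)) with hvals
  have hnodupvals : vals.Nodup := by rw [hvals, PySem.List.dedup]; exact PySem.Set.nodup_ofList _
  rw [pv_items_ofList _ (by
    rw [List.map_map]
    exact ((List.map_congr_left (fun v _ => rfl)).trans (List.map_id _)).symm ▸ hnodupvals)]
  refine List.map_congr_left (fun v hv => ?_)
  rw [List.filter_map]
  rw [List.map_map]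
  congr 1
  conv_rhs => rw [List.filter_congr (fun c hc => by rw [hgetD c hc])]
  rfl

-- ===== VERDICT (by name: the statement is the Claim_ definition above) =====
theorem invert_frequency_dict_spec : Claim_equal_invert_frequency_dict := by
  intro text _
  exact pv_main text
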